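-- pv_equiv track=rewrite | github.com/stepsbtw/Algoritmos | misc/conectivity.py | dfs_iter
-- ===== SOURCE A (Python) =====
-- def dfs_iter(adj, no_inicial):
--     visited = set()
--     stack = [(no_inicial, False)]
--     pre = []
--     post = []
--     pre_n = {}
--     post_n = {}
--     i=-1
--     j=-1
--
--     while stack:
--         no, explored = stack.pop()
--         if explored:
--             j+=1
--             post.append(no)
--             post_n[no] = j
--         elif no not in visited:
--             i+=1
--             visited.add(no)
--             pre.append(no)
--             pre_n[no] = i
--             stack.append((no, True))  # pós-visita (pós-ordem)
--             for nbor in reversed(adj[no]):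
--                 if nbor not in visited:
--                     stack.append((nbor, False))  # pré-visita
--     return pre, post, pre_n, post_n
-- ===== SOURCE B (Python) =====
-- def dfs_iter(adj, no_inicial):
--     # Recursive DFS: an inner visit(u) does the pre-step, recurses into
--     # unvisited forward neighbours, then does the post-step.
--     visited = set()
--     pre = []
--     post = []
--     pre_n = {}
--     post_n = {}
--     counters = [-1, -1]
--
--     def visit(u):
--         counters[0] += 1
--         visited.add(u)
--         pre.append(u)
--         pre_n[u] = counters[0]
--         for v in adj[u]:
--             if v not in visited:
--                 visit(v)
--         counters[1] += 1
--         post.append(u)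
--         post_n[u] = counters[1]
--
--     visit(no_inicial)
--     return pre, post, pre_n, post_n
-- ===== Notes on version B (the rewrite author's own statement) =====
-- stated objective: simpler
-- what changed: Replaces A's explicit marker stack (each node pushed twice: a pre-visit entry re-checked against visited at pop time and a separate post-marker entry, neighbours pushed reversed) by a plain recursive inner visit(u) that does the pre-step, recurses into unvisited neighbours in forward adj order, and then does the post-step; same DFS, but the call stack replaces the hand-managed stack.
import Mathlib
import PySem

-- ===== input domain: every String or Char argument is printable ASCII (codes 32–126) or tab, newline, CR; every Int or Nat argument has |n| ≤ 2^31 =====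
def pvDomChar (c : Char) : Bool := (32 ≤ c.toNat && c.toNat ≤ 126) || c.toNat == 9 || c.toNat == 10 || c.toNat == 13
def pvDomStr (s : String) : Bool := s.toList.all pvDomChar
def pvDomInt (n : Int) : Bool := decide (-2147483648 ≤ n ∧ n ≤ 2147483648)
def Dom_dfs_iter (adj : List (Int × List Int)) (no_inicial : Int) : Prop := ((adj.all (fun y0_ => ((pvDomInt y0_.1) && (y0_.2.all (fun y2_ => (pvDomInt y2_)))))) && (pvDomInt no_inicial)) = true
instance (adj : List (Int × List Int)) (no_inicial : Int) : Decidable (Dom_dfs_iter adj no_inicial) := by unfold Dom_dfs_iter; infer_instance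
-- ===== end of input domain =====

-- B replaces A's explicit marker stack (each node pushed twice, pop-time visited
-- re-checks, reversed neighbour pushes) by a plain recursive visit(u): pre-step,
-- recurse into unvisited forward neighbours, post-step; same DFS, simpler shape.

-- ===== PORT A =====

-- A's traversal state (visited is a Python set, pre_n/post_n are dicts)
structure DfsSt where
  visited : PySem.Set Int
  pre : List Int
  post : List Int
  pre_n : PySem.Dict Int Int
  post_n : PySem.Dict Int Int
  i : Int
  j : Int

-- Python's adj[u] (dict lookup, first match); a missing key is a KeyError in
-- Python — those inputs are excluded by Pre_, here the total form returns [].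
def adjGet (adj : List (Int × List Int)) (u : Int) : List Int :=
  (adj.lookup u).getD []

-- fuel bound: one unit per expanded node; every node ever visited occurs in this list
def pvUni (adj : List (Int × List Int)) (no_inicial : Int) : List Int :=
  no_inicial :: (adj.map Prod.fst ++ adj.flatMap Prod.snd)

-- A's while loop, transliterated; top of the Python stack = head of the list;
-- fuel (a totality guard only) is consumed exactly when an unvisited node is expanded.
def loopA (adj : List (Int × List Int)) : Nat → List (Int × Bool) → DfsSt → DfsSt
  | _, [], st => st
  | f, (no, explored) :: rest, st =>
    if explored then
      loopA adj f rest { st with j := st.j + 1, post := st.post ++ [no],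
                                 post_n := st.post_n.insert no (st.j + 1) }
    else if no ∉ st.visited then
      match f with
      | 0 => st
      | f' + 1 =>
        let vis' := PySem.Set.add st.visited no
        loopA adj f'
          ((adjGet adj no).reverse.foldl
            (fun s v => if v ∈ vis' then s else (v, false) :: s) ((no, true) :: rest))
          { st with i := st.i + 1, visited := vis', pre := st.pre ++ [no],
                    pre_n := st.pre_n.insert no (st.i + 1) }
    else
      loopA adj f rest st
  termination_by f stack _ => (f, stack.length)

def dfs_iter (adj : List (Int × List Int)) (no_inicial : Int) :
    List Int × List Int × (List (Int × Int)) × (List (Int × Int)) :=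
  let st := loopA adj ((pvUni adj no_inicial).length + 1) [(no_inicial, false)]
      ⟨PySem.Set.empty, [], [], PySem.Dict.empty, PySem.Dict.empty, -1, -1⟩
  (st.pre, st.post, st.pre_n.items, st.post_n.items)

-- ===== PORT B =====

-- B's state: the four output containers, the visited set and the two counters
-- (Source B's closed-over variables); field order and names are B's own.
structure RecSt where
  ordPre : List Int
  numPre : PySem.Dict Int Int
  ordPost : List Int
  numPost : PySem.Dict Int Int
  vis : PySem.Set Int
  cPre : Int
  cPost : Int

-- Source B's inner visit(u) and its for-loop over adj[u], as a mutual recursion;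
-- fuel is a totality guard only (one unit per recursive visit), consumed in the
-- loop exactly when an unvisited neighbour is entered.
mutual
def visitB (adj : List (Int × List Int)) (f : Nat) (u : Int) (s : RecSt) : RecSt :=
  let s1 : RecSt := ⟨s.ordPre ++ [u], s.numPre.insert u (s.cPre + 1), s.ordPost,
      s.numPost, PySem.Set.add s.vis u, s.cPre + 1, s.cPost⟩
  let s2 := visitFor adj f ((adj.lookup u).getD []) s1
  ⟨s2.ordPre, s2.numPre, s2.ordPost ++ [u], s2.numPost.insert u (s2.cPost + 1),
   s2.vis, s2.cPre, s2.cPost + 1⟩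
  termination_by (f, 1, 0)

def visitFor (adj : List (Int × List Int)) : Nat → List Int → RecSt → RecSt
  | _, [], s => s
  | f, v :: vs, s =>
    if v ∉ s.vis then
      match f with
      | 0 => s
      | f' + 1 => visitFor adj (f' + 1) vs (visitB adj f' v s)
    else
      visitFor adj f vs s
  termination_by f vs _ => (f, 0, vs.length)
end

def dfs_iter_alt (adj : List (Int × List Int)) (no_inicial : Int) :
    List Int × List Int × (List (Int × Int)) × (List (Int × Int)) :=
  let s := visitB adj ((adj.map Prod.fst ++ adj.flatMap Prod.snd).length + 1) no_inicial
      ⟨[], PySem.Dict.empty, [], PySem.Dict.empty, PySem.Set.empty, -1, -1⟩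
  (s.ordPre, s.ordPost, s.numPre.items, s.numPost.items)

-- ===== PRECONDITION & SPEC =====
-- reachable nodes: start plus, iterated, the neighbours of reachable keys
def pvReachStep (adj : List (Int × List Int)) (s : List Int) : List Int :=
  adj.foldl (fun t p => if p.1 ∈ s then PySem.Set.update t p.2 else t) s

def pvReach (adj : List (Int × List Int)) (no_inicial : Int) : List Int :=
  (pvReachStep adj)^[(no_inicial :: adj.map Prod.fst).length] [no_inicial]

-- Pre_ excludes exactly the inputs on which Python A raises KeyError: those where
-- some node reachable from the start is not a key of adj (A expands every
-- reachable node, so adj[...] fails there and nowhere else).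
def Pre_dfs_iter (adj : List (Int × List Int)) (no_inicial : Int) : Prop :=
  ∀ v ∈ pvReach adj no_inicial, v ∈ adj.map Prod.fst
instance (adj : List (Int × List Int)) (no_inicial : Int) : Decidable (Pre_dfs_iter adj no_inicial) := by
  unfold Pre_dfs_iter; infer_instance

def pvWitness_dfs_iter : (List (Int × List Int)) × Int := ([(0, [1, 2]), (1, [0]), (2, [])], 0)

def Spec_dfs_iter (adj : List (Int × List Int)) (no_inicial : Int) (out : List Int × List Int × (List (Int × Int)) × (List (Int × Int))) : Prop := out = dfs_iter_alt adj no_inicial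
instance (adj : List (Int × List Int)) (no_inicial : Int) (out : List Int × List Int × (List (Int × Int)) × (List (Int × Int))) : Decidable (Spec_dfs_iter adj no_inicial out) := by unfold Spec_dfs_iter; infer_instance

-- ===== CLAIM (what is proved, stated in full; the proofs are below) =====
def Claim_equal_dfs_iter : Prop := ∀ (adj : List (Int × List Int)) (no_inicial : Int), Dom_dfs_iter adj no_inicial → Pre_dfs_iter adj no_inicial → Spec_dfs_iter adj no_inicial (dfs_iter adj no_inicial)

-- ===== LEMMAS AND PROOFS =====

-- the elementary state steps (pre-visit and post-visit of a node), A's shape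
def preS (u : Int) (st : DfsSt) : DfsSt :=
  { st with i := st.i + 1, visited := PySem.Set.add st.visited u,
            pre := st.pre ++ [u], pre_n := st.pre_n.insert u (st.i + 1) }

def postS (u : Int) (st : DfsSt) : DfsSt :=
  { st with j := st.j + 1, post := st.post ++ [u], post_n := st.post_n.insert u (st.j + 1) }

-- proof-side recursive reference over A's state type; both ports reduce to it
def visitAux (adj : List (Int × List Int)) : Nat → List Int → DfsSt → DfsSt
  | _, [], st => st
  | f, v :: vs, st =>
    if v ∈ st.visited then visitAux adj f vs st
    else
      match f with
      | 0 => st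
      | f' + 1 => visitAux adj (f' + 1) vs (postS v (visitAux adj f' (adjGet adj v) (preS v st)))
  termination_by f vs _ => (f, vs.length)

def visitRec (adj : List (Int × List Int)) (f : Nat) (u : Int) (st : DfsSt) : DfsSt :=
  match f with
  | 0 => st
  | f' + 1 => postS u (visitAux adj f' (adjGet adj u) (preS u st))

-- remaining work measure: number of universe nodes not yet visited
def pvMu (U : Finset Int) (st : DfsSt) : Nat := (U \ st.visited.toFinset).card

theorem visited_postS (u : Int) (st : DfsSt) : (postS u st).visited = st.visited := rfl

theorem pvMu_postS (U : Finset Int) (u : Int) (st : DfsSt) : pvMu U (postS u st) = pvMu U st := rfl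

theorem subset_set_add (s : PySem.Set Int) (x : Int) : s ⊆ PySem.Set.add s x := by
  intro a ha
  exact (PySem.Set.mem_add s x a).mpr (Or.inl ha)

theorem pvMu_mono {U : Finset Int} {s t : DfsSt}
    (h : s.visited ⊆ t.visited) : pvMu U t ≤ pvMu U s := by
  apply Finset.card_le_card
  apply Finset.sdiff_subset_sdiff (le_refl U)
  intro x hx
  simp only [List.mem_toFinset] at *
  exact h hx

theorem pvMu_preS {U : Finset Int} {u : Int} {st : DfsSt}
    (hU : u ∈ U) (hv : u ∉ st.visited) : pvMu U (preS u st) = pvMu U st - 1 := by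
  have hadd : (PySem.Set.add st.visited u).toFinset = insert u st.visited.toFinset := by
    ext a
    simp [PySem.Set.mem_add]
    tauto
  show (U \ (PySem.Set.add st.visited u).toFinset).card = _
  rw [hadd, Finset.sdiff_insert]
  rw [Finset.card_erase_of_mem (by simp [Finset.mem_sdiff, hU, hv])]
  rfl

theorem pvMu_pos {U : Finset Int} {u : Int} {st : DfsSt}
    (hU : u ∈ U) (hv : u ∉ st.visited) : 1 ≤ pvMu U st := by
  have : u ∈ U \ st.visited.toFinset := by simp [Finset.mem_sdiff, hU, hv]
  exact Finset.card_pos.mpr ⟨u, this⟩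

-- step equations for visitAux
theorem visitAux_nil (adj : List (Int × List Int)) (f : Nat) (st : DfsSt) :
    visitAux adj f [] st = st := by rw [visitAux.eq_def]

theorem visitAux_skip (adj : List (Int × List Int)) (f : Nat) (v : Int) (vs : List Int)
    (st : DfsSt) (h : v ∈ st.visited) :
    visitAux adj f (v :: vs) st = visitAux adj f vs st := by
  rw [visitAux.eq_def]; simp only [if_pos h]

theorem visitAux_visit (adj : List (Int × List Int)) (f' : Nat) (v : Int) (vs : List Int)
    (st : DfsSt) (h : v ∉ st.visited) :
    visitAux adj (f' + 1) (v :: vs) st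
      = visitAux adj (f' + 1) vs (visitRec adj (f' + 1) v st) := by
  rw [visitAux.eq_def]; simp only [if_neg h]; rfl

-- visitAux only grows visited
theorem visitAux_mono (adj : List (Int × List Int)) (f : Nat) (vs : List Int) (st : DfsSt) :
    st.visited ⊆ (visitAux adj f vs st).visited := by
  induction f, vs, st using visitAux.induct adj with
  | case1 f st => rw [visitAux_nil]; exact fun a h => h
  | case2 f v vs st hmem ih =>
    rw [visitAux_skip _ _ _ _ _ hmem]; exact ih
  | case3 v vs st hmem =>
    rw [visitAux.eq_def]; simp only [if_neg hmem]; exact fun a h => h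
  | case4 v vs st hmem f' ih1 ih2 =>
    rw [visitAux_visit _ _ _ _ _ hmem]
    intro a ha
    exact ih2 (by
      show a ∈ (postS v (visitAux adj f' (adjGet adj v) (preS v st))).visited
      rw [visited_postS]
      exact ih1 (subset_set_add _ _ ha))

theorem visitRec_mono (adj : List (Int × List Int)) (f : Nat) (u : Int) (st : DfsSt) :
    st.visited ⊆ (visitRec adj f u st).visited := by
  cases f with
  | zero => exact fun a h => h
  | succ f' =>
    intro a ha
    show a ∈ (postS u (visitAux adj f' (adjGet adj u) (preS u st))).visited
    rw [visited_postS]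
    exact visitAux_mono adj f' _ _ (subset_set_add _ _ ha)

theorem pvMu_visitRec_le {U : Finset Int} (adj : List (Int × List Int)) {f' : Nat} {u : Int}
    {st : DfsSt} (hU : u ∈ U) (hv : u ∉ st.visited) :
    pvMu U (visitRec adj (f' + 1) u st) + 1 ≤ pvMu U st := by
  have h1 := pvMu_pos (st := st) hU hv
  have h2 : pvMu U (visitRec adj (f' + 1) u st) ≤ pvMu U (preS u st) := by
    apply pvMu_mono
    intro a ha
    show a ∈ (postS u (visitAux adj f' (adjGet adj u) (preS u st))).visited
    rw [visited_postS]
    exact visitAux_mono adj f' _ _ ha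
  rw [pvMu_preS hU hv] at h2
  omega

-- membership in A's neighbour-push fold
theorem mem_pushF {vis : PySem.Set Int} {l : List Int} {acc : List (Int × Bool)}
    {p : Int × Bool}
    (h : p ∈ l.foldr (fun v s => if v ∈ vis then s else (v, false) :: s) acc) :
    (∃ v ∈ l, p = (v, false)) ∨ p ∈ acc := by
  induction l with
  | nil => exact Or.inr h
  | cons v l ih =>
    simp only [List.foldr_cons] at h
    by_cases hv : v ∈ vis
    · rw [if_pos hv] at h
      rcases ih h with ⟨w, hw, hp⟩ | hp
      · exact Or.inl ⟨w, List.mem_cons_of_mem _ hw, hp⟩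
      · exact Or.inr hp
    · rw [if_neg hv] at h
      rcases List.mem_cons.mp h with hp | h'
      · exact Or.inl ⟨v, List.mem_cons_self, hp⟩
      · rcases ih h' with ⟨w, hw, hp⟩ | hp
        · exact Or.inl ⟨w, List.mem_cons_of_mem _ hw, hp⟩
        · exact Or.inr hp

-- step equations for loopA
theorem loopA_nil (adj : List (Int × List Int)) (f : Nat) (st : DfsSt) :
    loopA adj f [] st = st := by rw [loopA.eq_def]

theorem loopA_post (adj : List (Int × List Int)) (f : Nat) (no : Int)
    (rest : List (Int × Bool)) (st : DfsSt) :
    loopA adj f ((no, true) :: rest) st = loopA adj f rest (postS no st) := by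
  rw [loopA.eq_def]; rfl

theorem loopA_skip (adj : List (Int × List Int)) (f : Nat) (no : Int)
    (rest : List (Int × Bool)) (st : DfsSt) (h : no ∈ st.visited) :
    loopA adj f ((no, false) :: rest) st = loopA adj f rest st := by
  rw [loopA.eq_def]
  simp only [Bool.false_eq_true, if_false, if_neg (not_not_intro h)]

theorem loopA_visit (adj : List (Int × List Int)) (f : Nat) (no : Int)
    (rest : List (Int × Bool)) (st : DfsSt) (h : no ∉ st.visited) :
    loopA adj (f + 1) ((no, false) :: rest) st
      = loopA adj f
          ((adjGet adj no).foldr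
            (fun v s => if v ∈ (preS no st).visited then s else (v, false) :: s)
            ((no, true) :: rest)) (preS no st) := by
  rw [loopA.eq_def]
  simp only [Bool.false_eq_true, if_false, if_pos h, List.foldl_reverse]
  rfl

-- fuel insensitivity of loopA (given enough fuel, the result does not depend on it)
theorem loopA_fuel {U : Finset Int} (adj : List (Int × List Int))
    (hU : ∀ u v, v ∈ adjGet adj u → v ∈ U) :
    ∀ n stack st f g, pvMu U st ≤ n → (∀ p ∈ stack, p.1 ∈ U) →
      pvMu U st ≤ f → pvMu U st ≤ g →
      loopA adj f stack st = loopA adj g stack st := by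
  intro n
  induction n using Nat.strong_induction_on with
  | _ n IHn =>
  intro stack
  induction stack with
  | nil => intro st f g _ _ _ _; rw [loopA_nil, loopA_nil]
  | cons p rest IHs =>
    intro st f g hmu hinv hf hg
    obtain ⟨no, ex⟩ := p
    cases ex with
    | true =>
      rw [loopA_post, loopA_post]
      exact IHs (postS no st) f g (by rw [pvMu_postS]; exact hmu)
        (fun q hq => hinv q (List.mem_cons_of_mem _ hq))
        (by rw [pvMu_postS]; exact hf) (by rw [pvMu_postS]; exact hg)
    | false =>
      by_cases hv : no ∈ st.visited
      · rw [loopA_skip _ _ _ _ _ hv, loopA_skip _ _ _ _ _ hv]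
        exact IHs st f g hmu (fun q hq => hinv q (List.mem_cons_of_mem _ hq)) hf hg
      · have hUno : no ∈ U := hinv (no, false) List.mem_cons_self
        have h1 := pvMu_pos (st := st) hUno hv
        obtain ⟨f', rfl⟩ : ∃ f', f = f' + 1 := ⟨f - 1, by omega⟩
        obtain ⟨g', rfl⟩ : ∃ g', g = g' + 1 := ⟨g - 1, by omega⟩
        rw [loopA_visit _ _ _ _ _ hv, loopA_visit _ _ _ _ _ hv]
        have hmem : ∀ q ∈ (adjGet adj no).foldr
            (fun v s => if v ∈ (preS no st).visited then s else (v, false) :: s)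
            ((no, true) :: rest), q.1 ∈ U := by
          intro q hq
          rcases mem_pushF hq with ⟨w, hw, rfl⟩ | hq'
          · exact hU no w hw
          · rcases List.mem_cons.mp hq' with rfl | hq''
            · exact hUno
            · exact hinv q (List.mem_cons_of_mem _ hq'')
        apply IHn (n - 1) (by omega)
        · rw [pvMu_preS hUno hv]; omega
        · exact hmem
        · rw [pvMu_preS hUno hv]; omega
        · rw [pvMu_preS hUno hv]; omega

-- MAIN LEMMA, A side: expanding one unvisited node from the stack
-- equals one recursive visit
theorem loopA_eq_visit {U : Finset Int} (adj : List (Int × List Int))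
    (hU : ∀ u v, v ∈ adjGet adj u → v ∈ U) :
    ∀ n st u rest f, pvMu U st ≤ n → u ∈ U → u ∉ st.visited →
      (∀ p ∈ rest, p.1 ∈ U) → pvMu U st ≤ f →
      loopA adj f ((u, false) :: rest) st = loopA adj f rest (visitRec adj f u st) := by
  intro n
  induction n with
  | zero =>
    intro st u rest f hmu hu hv _ _
    exact absurd hmu (by have := pvMu_pos (st := st) hu hv; omega)
  | succ n IH =>
    intro st u rest f hmu hu hv hinv hf
    have h1 := pvMu_pos (st := st) hu hv
    obtain ⟨f', rfl⟩ : ∃ f', f = f' + 1 := ⟨f - 1, by omega⟩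
    -- inner lemma: a block of pushed pre-visit entries equals the recursive fold
    have LA : ∀ (vs : List Int), ∀ (st' : DfsSt) (rest' : List (Int × Bool)) (g : Nat)
        (vis0 : PySem.Set Int), pvMu U st' ≤ n → (∀ v ∈ vs, v ∈ U) →
        (∀ p ∈ rest', p.1 ∈ U) → pvMu U st' ≤ g → vis0 ⊆ st'.visited →
        loopA adj g (vs.foldr (fun v s => if v ∈ vis0 then s else (v, false) :: s) rest') st'
          = loopA adj g rest' (visitAux adj g vs st') := by
      intro vs
      induction vs with
      | nil => intro st' rest' g vis0 _ _ _ _ _; rw [visitAux_nil]; rfl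
      | cons v vs ihv =>
        intro st' rest' g vis0 hmu' hvs hrest hg hsub
        simp only [List.foldr_cons]
        by_cases hv0 : v ∈ vis0
        · rw [if_pos hv0, ihv st' rest' g vis0 hmu' (fun w hw => hvs w (List.mem_cons_of_mem _ hw)) hrest hg hsub,
              visitAux_skip _ _ _ _ _ (hsub hv0)]
        · rw [if_neg hv0]
          by_cases hvv : v ∈ st'.visited
          · rw [loopA_skip _ _ _ _ _ hvv,
                ihv st' rest' g vis0 hmu' (fun w hw => hvs w (List.mem_cons_of_mem _ hw)) hrest hg hsub,
                visitAux_skip _ _ _ _ _ hvv]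
          · have hUv : v ∈ U := hvs v List.mem_cons_self
            have h2 := pvMu_pos (st := st') hUv hvv
            obtain ⟨g', rfl⟩ : ∃ g', g = g' + 1 := ⟨g - 1, by omega⟩
            have hmemF : ∀ p ∈ vs.foldr (fun w s => if w ∈ vis0 then s else (w, false) :: s) rest',
                p.1 ∈ U := by
              intro p hp
              rcases mem_pushF hp with ⟨w, hw, rfl⟩ | hp'
              · exact hvs w (List.mem_cons_of_mem _ hw)
              · exact hrest p hp'
            rw [IH st' v _ (g' + 1) (by omega) hUv hvv hmemF hg]
            have hd := pvMu_visitRec_le (f' := g') adj hUv hvv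
            rw [ihv (visitRec adj (g' + 1) v st') rest' (g' + 1) vis0
                  (by omega)
                  (fun w hw => hvs w (List.mem_cons_of_mem _ hw)) hrest (by omega)
                  (fun a ha => visitRec_mono adj (g' + 1) v st' (hsub ha))]
            rw [← visitAux_visit adj g' v vs st' hvv]
    rw [loopA_visit _ _ _ _ _ hv]
    have hmu1 : pvMu U (preS u st) ≤ n := by rw [pvMu_preS hu hv]; omega
    rw [LA (adjGet adj u) (preS u st) ((u, true) :: rest) f' (preS u st).visited hmu1
          (hU u)
          (by intro p hp
              rcases List.mem_cons.mp hp with rfl | hp'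
              · exact hu
              · exact hinv p hp')
          (by rw [pvMu_preS hu hv]; omega)
          (fun a ha => ha)]
    rw [loopA_post]
    show loopA adj f' rest (visitRec adj (f' + 1) u st)
        = loopA adj (f' + 1) rest (visitRec adj (f' + 1) u st)
    apply loopA_fuel adj hU (pvMu U (visitRec adj (f' + 1) u st))
    · exact le_refl _
    · exact hinv
    · have := pvMu_visitRec_le (f' := f') adj hu hv; omega
    · have := pvMu_visitRec_le (f' := f') adj hu hv; omega

-- B side: the field-for-field correspondence between RecSt and DfsSt
def conv (s : RecSt) : DfsSt :=
  ⟨s.vis, s.ordPre, s.ordPost, s.numPre, s.numPost, s.cPre, s.cPost⟩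

-- step equations for visitFor/visitB
theorem visitFor_nil (adj : List (Int × List Int)) (f : Nat) (s : RecSt) :
    visitFor adj f [] s = s := by rw [visitFor.eq_def]

theorem visitFor_skip (adj : List (Int × List Int)) (f : Nat) (v : Int) (vs : List Int)
    (s : RecSt) (h : v ∈ s.vis) :
    visitFor adj f (v :: vs) s = visitFor adj f vs s := by
  rw [visitFor.eq_def]; simp only [if_neg (not_not_intro h)]

theorem visitFor_stuck (adj : List (Int × List Int)) (v : Int) (vs : List Int)
    (s : RecSt) (h : v ∉ s.vis) :
    visitFor adj 0 (v :: vs) s = s := by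
  rw [visitFor.eq_def]; simp only [if_pos h]

theorem visitFor_enter (adj : List (Int × List Int)) (f' : Nat) (v : Int) (vs : List Int)
    (s : RecSt) (h : v ∉ s.vis) :
    visitFor adj (f' + 1) (v :: vs) s = visitFor adj (f' + 1) vs (visitB adj f' v s) := by
  rw [visitFor.eq_def]; simp only [if_pos h]

-- B's visit equals the reference visit, through conv
theorem conv_visitFor (adj : List (Int × List Int)) :
    ∀ (f : Nat) (vs : List Int) (s : RecSt),
      conv (visitFor adj f vs s) = visitAux adj f vs (conv s) := by
  intro f
  induction f with
  | zero =>
    intro vs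
    induction vs with
    | nil => intro s; rw [visitFor_nil, visitAux_nil]
    | cons v vs ih =>
      intro s
      by_cases h : v ∈ s.vis
      · rw [visitFor_skip _ _ _ _ _ h, visitAux_skip _ _ _ _ _ h, ih]
      · rw [visitFor_stuck _ _ _ _ h, visitAux.eq_def]
        simp only []
        rw [if_neg (show v ∉ (conv s).visited from h)]
  | succ f ihf =>
    intro vs
    induction vs with
    | nil => intro s; rw [visitFor_nil, visitAux_nil]
    | cons v vs ih =>
      intro s
      by_cases h : v ∈ s.vis
      · rw [visitFor_skip _ _ _ _ _ h, visitAux_skip _ _ _ _ _ h, ih]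
      · rw [visitFor_enter _ _ _ _ _ h, ih, visitAux_visit adj f v vs _ h]
        congr 1
        rw [visitB]
        show conv _ = postS v (visitAux adj f (adjGet adj v) (preS v (conv s)))
        have hpre : conv ⟨s.ordPre ++ [v], s.numPre.insert v (s.cPre + 1), s.ordPost,
            s.numPost, PySem.Set.add s.vis v, s.cPre + 1, s.cPost⟩ = preS v (conv s) := rfl
        rw [show adjGet adj v = (adj.lookup v).getD [] from rfl, ← hpre, ← ihf]
        rfl

theorem conv_visitB (adj : List (Int × List Int)) (f : Nat) (u : Int) (s : RecSt) :
    conv (visitB adj f u s) = visitRec adj (f + 1) u (conv s) := by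
  rw [visitB]
  show conv _ = postS u (visitAux adj f (adjGet adj u) (preS u (conv s)))
  have hpre : conv ⟨s.ordPre ++ [u], s.numPre.insert u (s.cPre + 1), s.ordPost,
      s.numPost, PySem.Set.add s.vis u, s.cPre + 1, s.cPost⟩ = preS u (conv s) := rfl
  rw [show adjGet adj u = (adj.lookup u).getD [] from rfl, ← hpre, ← conv_visitFor]
  rfl

-- every neighbour list returned by adjGet is inside the universe
theorem adjGet_mem_flat (adj : List (Int × List Int)) (u v : Int)
    (h : v ∈ adjGet adj u) : v ∈ adj.flatMap Prod.snd := by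
  unfold adjGet at h
  induction adj with
  | nil => simp [List.lookup] at h
  | cons p l ih =>
    obtain ⟨a, b⟩ := p
    rw [List.lookup] at h
    cases hua : (u == a) with
    | true =>
      simp only [hua, Option.getD_some] at h
      exact List.mem_flatMap.mpr ⟨(a, b), List.mem_cons_self, h⟩
    | false =>
      simp only [hua] at h
      rcases List.mem_flatMap.mp (ih h) with ⟨q, hq, hv⟩
      exact List.mem_flatMap.mpr ⟨q, List.mem_cons_of_mem _ hq, hv⟩

theorem hU_pvUni (adj : List (Int × List Int)) (n0 : Int) :
    ∀ u v, v ∈ adjGet adj u → v ∈ (pvUni adj n0).toFinset := by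
  intro u v h
  simp only [List.mem_toFinset, pvUni, List.mem_cons, List.mem_append]
  exact Or.inr (Or.inr (adjGet_mem_flat adj u v h))

-- the two ports agree on every input (totalised via adjGet/fuel)
theorem dfs_eq (adj : List (Int × List Int)) (n0 : Int) :
    dfs_iter adj n0 = dfs_iter_alt adj n0 := by
  have hU := hU_pvUni adj n0
  set U : Finset Int := (pvUni adj n0).toFinset with hUdef
  set L : Nat := (pvUni adj n0).length with hL
  have hn0 : n0 ∈ U := by simp [hUdef, pvUni]
  set init : DfsSt := ⟨PySem.Set.empty, [], [], PySem.Dict.empty, PySem.Dict.empty, -1, -1⟩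
    with hinit
  have hvempty : n0 ∉ init.visited := by simp [hinit, PySem.Set.empty]
  have hmu0 : pvMu U init ≤ L := by
    have : pvMu U init = U.card := by
      unfold pvMu
      rw [hinit]
      simp [PySem.Set.empty]
    rw [this, hUdef, hL]
    exact List.toFinset_card_le _
  -- A side reduces to the reference visit
  have hA : loopA adj (L + 1) [(n0, false)] init = visitRec adj (L + 1) n0 init := by
    rw [loopA_eq_visit adj hU (pvMu U init) init n0 [] (L + 1) (le_refl _) hn0 hvempty
          (by intro p hp; cases hp) (by omega)]
    rw [loopA_nil]
  -- B side: visitB at fuel L (= the inline length + 1) is the same reference visit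
  set initB : RecSt := ⟨[], PySem.Dict.empty, [], PySem.Dict.empty, PySem.Set.empty, -1, -1⟩
    with hinitB
  have hF : (adj.map Prod.fst ++ adj.flatMap Prod.snd).length + 1 = L := by
    rw [hL]; simp [pvUni]
  have hB : conv (visitB adj L n0 initB) = visitRec adj (L + 1) n0 init := by
    rw [conv_visitB]
    rfl
  show (let st := loopA adj ((pvUni adj n0).length + 1) [(n0, false)] init
        (st.pre, st.post, st.pre_n.items, st.post_n.items))
      = dfs_iter_alt adj n0
  unfold dfs_iter_alt
  rw [hF]
  simp only [← hL, hA]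
  rw [← hB]
  rfl

-- ===== VERDICT (by name: the statement is the Claim_ definition above) =====
theorem dfs_iter_spec : Claim_equal_dfs_iter := by
  intro adj no_inicial _ _
  unfold Spec_dfs_iter
  exact dfs_eq adj no_inicial
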